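-- pv_equiv track=rewrite | github.com/petlindg/advent-of-code | 2025/6/solution1.py | solve
-- ===== SOURCE A (Python) =====
-- import math
--
-- def solve(nums, ops):
--     s = 0
--     for i, op in enumerate(ops):
--         tmp = [e[i] for e in nums]
--         if op=='+':
--             s += sum(tmp)
--         else:
--             s += math.prod(tmp)
--     return s
-- ===== SOURCE B (Python) =====
-- def solve(nums, ops):
--     acc = [0 if op == '+' else 1 for op in ops]
--     for row in nums:
--         acc = [a + x if op == '+' else a * x
--                for a, x, op in zip(acc, row, ops)]
--     return sum(acc)
-- ===== Notes on version B (the rewrite author's own statement) =====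
-- stated objective: alternative
-- what changed: Single row-major pass threading one accumulator per column (initialized 0 for '+' and 1 otherwise) instead of extracting each column as a list and reducing it separately.
import Mathlib
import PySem

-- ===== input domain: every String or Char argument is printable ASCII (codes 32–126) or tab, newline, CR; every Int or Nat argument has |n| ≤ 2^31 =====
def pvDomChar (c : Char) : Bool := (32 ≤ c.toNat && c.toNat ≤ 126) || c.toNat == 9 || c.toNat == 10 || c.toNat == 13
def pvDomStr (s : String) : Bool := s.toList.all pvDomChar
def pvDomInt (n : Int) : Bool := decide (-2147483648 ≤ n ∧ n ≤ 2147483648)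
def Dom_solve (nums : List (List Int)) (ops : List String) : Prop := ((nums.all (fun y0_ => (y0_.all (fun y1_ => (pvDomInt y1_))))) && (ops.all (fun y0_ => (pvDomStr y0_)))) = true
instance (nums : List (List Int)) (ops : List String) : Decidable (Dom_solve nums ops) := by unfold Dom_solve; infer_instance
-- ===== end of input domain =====

-- B changes the traversal: one row-major pass threading a per-column accumulator
-- (0 for '+', 1 otherwise) instead of extracting each column and reducing it (objective: alternative).

-- ===== PORT A =====
-- for i, op in enumerate(ops): tmp = [e[i] for e in nums]; s += sum(tmp) or math.prod(tmp)
def solve (nums : List (List Int)) (ops : List String) : Int :=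
  (ops.zipIdx).foldl (fun s p =>
    let tmp := nums.map (fun e => ((PySem.List.pyGet? e ((p.2 : Nat) : Int)).getD 0))
    if p.1 = "+" then s + tmp.sum else s + tmp.foldl (· * ·) 1) 0

-- ===== PORT B =====
-- zip(acc, row, ops) comprehension, ported as a hand-written zipWith3
def zip3Acc (f : Int → Int → String → Int) : List Int → List Int → List String → List Int
  | a :: as, x :: xs, op :: opsT => f a x op :: zip3Acc f as xs opsT
  | _, _, _ => []

def solve_alt (nums : List (List Int)) (ops : List String) : Int :=
  (nums.foldl
    (fun acc row => zip3Acc (fun a x op => if op = "+" then a + x else a * x) acc row ops)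
    (ops.map (fun op => if op = "+" then (0 : Int) else 1))).sum

-- ===== PRECONDITION & SPEC =====
-- Pre_ excludes exactly the inputs where A raises IndexError (a row shorter than ops).
def Pre_solve (nums : List (List Int)) (ops : List String) : Prop :=
  ∀ row ∈ nums, ops.length ≤ row.length
instance (nums : List (List Int)) (ops : List String) : Decidable (Pre_solve nums ops) := by unfold Pre_solve; infer_instance

def pvWitness_solve : List (List Int) × List String := ([[1, 2], [3, 4]], ["+", "*"])

def Spec_solve (nums : List (List Int)) (ops : List String) (out : Int) : Prop := out = solve_alt nums ops
instance (nums : List (List Int)) (ops : List String) (out : Int) : Decidable (Spec_solve nums ops out) := by unfold Spec_solve; infer_instance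

-- ===== CLAIM (what is proved, stated in full; the proofs are below) =====
def Claim_equal_solve : Prop := ∀ (nums : List (List Int)) (ops : List String), Dom_solve nums ops → Pre_solve nums ops → Spec_solve nums ops (solve nums ops)

-- ===== LEMMAS AND PROOFS =====

-- common reference value, by recursion on ops, consuming heads of the rows
def specSum : List String → List (List Int) → Int
  | [], _ => 0
  | op :: opsT, nums =>
    (if op = "+" then (nums.map (fun e => e.headD 0)).sum
     else (nums.map (fun e => e.headD 0)).prod)
    + specSum opsT (nums.map (fun e => e.tail))

theorem foldl_add_map {α : Type} (l : List α) (g : α → Int) :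
    ∀ (a : Int), l.foldl (fun s x => s + g x) a = a + (l.map g).sum := by
  induction l with
  | nil => simp
  | cons x xs ih => intro a; simp [ih]; ring

theorem foldl_mul_map {α : Type} (l : List α) (g : α → Int) :
    ∀ (a : Int), l.foldl (fun s x => s * g x) a = a * (l.map g).prod := by
  induction l with
  | nil => simp
  | cons x xs ih => intro a; simp [ih]; ring

theorem solve_A_aux (nums : List (List Int)) :
    ∀ (ops : List String) (s : Int) (k : Nat),
    (ops.zipIdx k).foldl (fun s p =>
      let tmp := nums.map (fun e => ((PySem.List.pyGet? e ((p.2 : Nat) : Int)).getD 0))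
      if p.1 = "+" then s + tmp.sum else s + tmp.foldl (· * ·) 1) s
    = s + specSum ops (nums.map (fun e => e.drop k)) := by
  intro ops
  induction ops with
  | nil => intro s k; simp [specSum]
  | cons op opsT ih =>
    intro s k
    rw [List.zipIdx_cons, List.foldl_cons, ih _ (k + 1)]
    have hcol : nums.map (fun e => ((PySem.List.pyGet? e ((k : Nat) : Int)).getD 0))
        = (nums.map (fun e => e.drop k)).map (fun e => e.headD 0) := by
      simp [List.map_map, Function.comp]
    have htail : nums.map (fun e => e.drop (k + 1))
        = (nums.map (fun e => e.drop k)).map (fun e => e.tail) := by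
      simp [List.map_map, Function.comp, List.tail_drop]
    rw [specSum, ← hcol, ← htail]
    by_cases hop : op = "+"
    · simp only [hop, if_true]
      ring
    · simp only [hop, if_false]
      rw [← List.prod_eq_foldl]
      ring

theorem solve_eq_spec (nums : List (List Int)) (ops : List String) :
    solve nums ops = specSum ops nums := by
  have h := solve_A_aux nums ops 0 0
  simpa [solve] using h

theorem zip3Acc_nil_left (f : Int → Int → String → Int) (row : List Int) (ops : List String) :
    zip3Acc f [] row ops = [] := by
  cases row <;> cases ops <;> rfl

theorem foldl_zip3_nil (f : Int → Int → String → Int) (nums : List (List Int)) (ops : List String) :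
    nums.foldl (fun acc row => zip3Acc f acc row ops) [] = [] := by
  induction nums with
  | nil => rfl
  | cons r rs ih => simpa [zip3Acc_nil_left] using ih

theorem foldl_zip3_cons (f : Int → Int → String → Int) (op : String) (opsT : List String) :
    ∀ (nums : List (List Int)) (a0 : Int) (acc0 : List Int),
    (∀ row ∈ nums, row ≠ []) →
    nums.foldl (fun acc row => zip3Acc f acc row (op :: opsT)) (a0 :: acc0)
    = (nums.foldl (fun a row => f a (row.headD 0) op) a0)
      :: ((nums.map (fun e => e.tail)).foldl (fun acc row => zip3Acc f acc row opsT) acc0) := by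
  intro nums
  induction nums with
  | nil => intro a0 acc0 _; rfl
  | cons r rs ih =>
    intro a0 acc0 hne
    have hr : r ≠ [] := hne r (List.mem_cons_self)
    cases r with
    | nil => exact absurd rfl hr
    | cons x rt =>
      simp only [List.foldl_cons, List.map_cons, zip3Acc, List.headD]
      exact ih (f a0 x op) (zip3Acc f acc0 rt opsT) (fun row h => hne row (List.mem_cons_of_mem _ h))

theorem solve_alt_eq_spec :
    ∀ (ops : List String) (nums : List (List Int)),
    (∀ row ∈ nums, ops.length ≤ row.length) →
    solve_alt nums ops = specSum ops nums := by
  intro ops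
  induction ops with
  | nil =>
    intro nums _
    simp [solve_alt, specSum, foldl_zip3_nil]
  | cons op opsT ih =>
    intro nums hlen
    have hne : ∀ row ∈ nums, row ≠ [] := by
      intro row hr hcontra
      have := hlen row hr
      simp [hcontra] at this
    unfold solve_alt
    rw [List.map_cons, foldl_zip3_cons _ _ _ _ _ _ hne, List.sum_cons]
    have htails : ∀ row ∈ nums.map (fun e => e.tail), opsT.length ≤ row.length := by
      intro row hr
      rcases List.mem_map.mp hr with ⟨e, he, rfl⟩
      have := hlen e he
      simp at this ⊢
      omega
    have hih := ih (nums.map (fun e => e.tail)) htails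
    unfold solve_alt at hih
    rw [hih, specSum]
    by_cases hop : op = "+"
    · simp only [hop, if_true]
      rw [foldl_add_map]
      ring
    · simp only [hop, if_false]
      rw [foldl_mul_map]
      ring

-- ===== VERDICT (by name: the statement is the Claim_ definition above) =====
theorem solve_spec : Claim_equal_solve := by
  intro nums ops _ hpre
  unfold Spec_solve
  rw [solve_eq_spec, solve_alt_eq_spec ops nums hpre]
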